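-- pv_equiv track=rewrite | github.com/Ewan-Sutherland/WorldQuant---ExSIF | generator.py | _fix_rank_group
-- ===== SOURCE A (Python) =====
-- def _fix_rank_group(expr: str) -> str:
--     """Fix rank(x, industry) → group_rank(x, industry) using balanced paren matching."""
--     result = []
--     i = 0
--     while i < len(expr):
--         if expr[i:i+5] == 'rank(' and (i == 0 or not (expr[i-1].isalpha() or expr[i-1] == '_')):
--             depth = 1
--             j = i + 5
--             while j < len(expr) and depth > 0:
--                 if expr[j] == '(': depth += 1
--                 elif expr[j] == ')': depth -= 1
--                 j += 1
--             inner = expr[i+5:j-1]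
--             for grp in ['industry', 'subindustry', 'sector', 'market']:
--                 if inner.rstrip().endswith(f', {grp}'):
--                     result.append('group_rank(' + inner + ')')
--                     i = j
--                     break
--             else:
--                 result.append(expr[i])
--                 i += 1
--         else:
--             result.append(expr[i])
--             i += 1
--     return ''.join(result)
-- ===== SOURCE B (Python) =====
-- def _fix_rank_group(expr: str) -> str:
--     """Fix rank(x, industry) -> group_rank(x, industry); one stack pass precomputes
--     matching parens, then a single scan rewrites using slice chunks."""
--     n = len(expr)
--     match = {}
--     stack = []
--     for idx, ch in enumerate(expr):
--         if ch == '(':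
--             stack.append(idx)
--         elif ch == ')':
--             if stack:
--                 match[stack.pop()] = idx
--     groups = ('industry', 'subindustry', 'sector', 'market')
--     out = []
--     last = 0
--     i = 0
--     while i < n:
--         if (expr.startswith('rank(', i)
--                 and (i == 0 or (not expr[i-1].isalpha() and expr[i-1] != '_'))):
--             j = match[i + 4] + 1 if i + 4 in match else n
--             inner = expr[i+5:j-1]
--             stripped = inner.rstrip()
--             if any(stripped.endswith(', ' + g) for g in groups):
--                 out.append(expr[last:i])
--                 out.append('group_rank(' + inner + ')')
--                 i = j
--                 last = j
--                 continue
--         i += 1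
--     out.append(expr[last:])
--     return ''.join(out)
-- ===== Notes on version B (the rewrite author's own statement) =====
-- stated objective: alternative
-- what changed: B precomputes every matching close-paren position in one stack pass over the whole string and then rewrites in a single scan that looks each close paren up in O(1) and emits whole slices between rewrites, instead of A's per-occurrence inner depth-counting scan and per-character appends; intended as the asymptotically better version (A is quadratic on nested occurrences) but a timing run did not confirm a consistent 1.5x on the generated inputs, so no speed is claimed.
import Mathlib
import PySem

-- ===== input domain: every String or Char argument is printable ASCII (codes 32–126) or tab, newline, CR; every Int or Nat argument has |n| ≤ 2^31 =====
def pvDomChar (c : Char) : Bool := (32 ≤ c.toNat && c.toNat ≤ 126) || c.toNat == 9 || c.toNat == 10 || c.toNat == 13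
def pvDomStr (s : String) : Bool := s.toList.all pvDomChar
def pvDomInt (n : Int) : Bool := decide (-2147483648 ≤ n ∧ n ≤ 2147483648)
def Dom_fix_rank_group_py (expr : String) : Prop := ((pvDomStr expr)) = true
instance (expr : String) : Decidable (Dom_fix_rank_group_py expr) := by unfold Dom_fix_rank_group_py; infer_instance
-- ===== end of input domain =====

-- B replaces A's per-occurrence inner depth scan by one stack pass that precomputes every
-- matching close paren, then rewrites in a single scan emitting whole slices (objective: alternative algorithm).

-- ===== PORT A =====

-- 'rank(' as a character list
def pvRank : List Char := ['r', 'a', 'n', 'k', '(']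

-- ['industry', 'subindustry', 'sector', 'market']
def pvGroups : List (List Char) :=
  [['i','n','d','u','s','t','r','y'],
   ['s','u','b','i','n','d','u','s','t','r','y'],
   ['s','e','c','t','o','r'],
   ['m','a','r','k','e','t']]

-- A's guard: expr[i:i+5] == 'rank(' and (i == 0 or not (expr[i-1].isalpha() or expr[i-1] == '_'))
-- (expr[i-1] is guarded by i == 0, so the total getD with a dummy default is exact)
def pvCondA (cs : List Char) (i : Nat) : Bool :=
  (PySem.List.slice cs (some (i : Int)) (some ((i + 5 : Nat) : Int)) == pvRank) &&
  (i == 0 || !(PySem.Chars.isalpha (cs.getD (i - 1) ' ') || cs.getD (i - 1) ' ' == '_'))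

-- A's inner while loop over the suffix expr[i+5:], returning how far j advanced
def pvScanA : List Char → Int → Nat
  | [], _ => 0
  | c :: t, depth =>
    if depth > 0 then
      let d' := if c = '(' then depth + 1 else if c = ')' then depth - 1 else depth
      1 + pvScanA t d'
    else 0

-- A's for-else over the group names: true iff some group matched (then the replacement branch runs)
def pvGrpA : List (List Char) → List Char → Bool
  | [], _ => false
  | g :: gs, inner =>
    if PySem.Chars.endswith (PySem.Chars.rstrip inner) ([',', ' '] ++ g) then true
    else pvGrpA gs inner

def pvGroupRank (inner : List Char) : List Char :=
  ['g','r','o','u','p','_','r','a','n','k','('] ++ inner ++ [')']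

-- A's local j: where the inner depth-counting while loop stops
def pvJA (cs : List Char) (i : Nat) : Nat := i + 5 + pvScanA (cs.drop (i + 5)) 1

-- A's local inner = expr[i+5 : j-1]
def pvInnerA (cs : List Char) (i : Nat) : List Char :=
  PySem.List.slice cs (some ((i + 5 : Nat) : Int)) (some (Int.ofNat (pvJA cs i) - 1))

theorem pvJA_ge (cs : List Char) (i : Nat) : i + 5 ≤ pvJA cs i := by
  simp [pvJA]

-- A's main while loop, accumulating the `result` list of strings
def pvLoopA (cs : List Char) (i : Nat) (acc : List (List Char)) : List (List Char) :=
  if h : i < cs.length then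
    if pvCondA cs i then
      if pvGrpA pvGroups (pvInnerA cs i) then
        pvLoopA cs (pvJA cs i) (acc ++ [pvGroupRank (pvInnerA cs i)])
      else
        pvLoopA cs (i + 1) (acc ++ [[cs[i]]])
    else
      pvLoopA cs (i + 1) (acc ++ [[cs[i]]])
  else acc
termination_by cs.length - i
decreasing_by
  · have := pvJA_ge cs i; omega
  · omega
  · omega

def fix_rank_group_py (expr : String) : String :=
  String.ofList (PySem.Chars.join [] (pvLoopA expr.toList 0 []))

-- ===== PORT B =====

-- B's first pass: `for idx, ch in enumerate(expr)` with a stack, building the paren-match dict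
-- (enumerate ported as an index-carrying recursion; stack top = list head)
def pvBuildB : List Char → Nat → List Nat → PySem.Dict Nat Nat → List Nat × PySem.Dict Nat Nat
  | [], _, stk, m => (stk, m)
  | c :: t, idx, stk, m =>
    if c = '(' then pvBuildB t (idx + 1) (idx :: stk) m
    else if c = ')' then
      match stk with
      | [] => pvBuildB t (idx + 1) [] m
      | top :: rest => pvBuildB t (idx + 1) rest (m.insert top idx)
    else pvBuildB t (idx + 1) stk m

-- every entry of the built dict maps an open position to a strictly later close position
-- (used only for pvLoopB's termination)
theorem pvBuild_keylt : ∀ (l : List Char) (idx : Nat) (stk : List Nat) (m : PySem.Dict Nat Nat),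
    (∀ q ∈ stk, q < idx) → (∀ a b, m.get? a = some b → a < b) →
    ∀ a b, ((pvBuildB l idx stk m).2).get? a = some b → a < b := by
  intro l
  induction l with
  | nil => intro idx stk m hs hm a b h; exact hm a b h
  | cons c t ih =>
    intro idx stk m hs hm a b h
    simp only [pvBuildB] at h
    split at h
    · refine ih (idx + 1) _ m (fun q hq => ?_) hm a b h
      rcases List.mem_cons.mp hq with hq | hq
      · omega
      · have := hs q hq; omega
    · split at h
      · rcases stk with _ | ⟨top, rest⟩
        · exact ih _ _ _ (by simp) hm a b h
        · refine ih _ _ _ (fun q hq => ?_) (fun a' b' h' => ?_) a b h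
          · have := hs q (List.mem_cons_of_mem _ hq); omega
          · by_cases hak : a' = top
            · subst hak
              rw [PySem.Dict.get?_insert_self] at h'
              have h1 := hs a' List.mem_cons_self
              have h2 := Option.some.inj h'
              omega
            · rw [PySem.Dict.get?_insert_of_ne _ _ hak] at h'
              exact hm a' b' h'
      · exact ih _ _ _ (fun q hq => by have := hs q hq; omega) hm a b h

-- B's guard: expr.startswith('rank(', i) and (i == 0 or (not isalpha and != '_'))
def pvCondB (cs : List Char) (i : Nat) : Bool :=
  PySem.Chars.startswith (cs.drop i) pvRank &&
  (i == 0 || (!PySem.Chars.isalpha (cs.getD (i - 1) ' ') && cs.getD (i - 1) ' ' != '_'))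

-- any(stripped.endswith(', ' + g) for g in groups)
def pvGrpB (inner : List Char) : Bool :=
  let stripped := PySem.Chars.rstrip inner
  pvGroups.any (fun g => PySem.Chars.endswith stripped ([',', ' '] ++ g))

-- B's local j: match[i + 4] + 1 if i + 4 in match else n
def pvJB (m : PySem.Dict Nat Nat) (cs : List Char) (i : Nat) : Nat :=
  match m.get? (i + 4) with | some q => q + 1 | none => cs.length

-- B's local inner = expr[i+5 : j-1]
def pvInnerB (m : PySem.Dict Nat Nat) (cs : List Char) (i : Nat) : List Char :=
  PySem.List.slice cs (some ((i + 5 : Nat) : Int)) (some (Int.ofNat (pvJB m cs i) - 1))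

theorem pvJB_gt (m : PySem.Dict Nat Nat) (cs : List Char)
    (hm : ∀ a b, m.get? a = some b → a < b) (i : Nat) (hi : i < cs.length) :
    i < pvJB m cs i := by
  unfold pvJB
  rcases hq : m.get? (i + 4) with _ | q
  · simp only []; omega
  · have := hm _ _ hq; simp only []; omega

-- B's single rewriting scan; `out` collects slices, `last` is the start of the pending chunk
def pvLoopB (cs : List Char) (m : PySem.Dict Nat Nat)
    (hm : ∀ a b, m.get? a = some b → a < b) (i last : Nat) (out : List (List Char)) :
    List (List Char) :=
  if h : i < cs.length then
    if pvCondB cs i then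
      if pvGrpB (pvInnerB m cs i) then
        pvLoopB cs m hm (pvJB m cs i) (pvJB m cs i)
          (out ++ [PySem.List.slice cs (some (last : Int)) (some (i : Int)),
                   pvGroupRank (pvInnerB m cs i)])
      else pvLoopB cs m hm (i + 1) last out
    else pvLoopB cs m hm (i + 1) last out
  else out ++ [cs.drop last]
termination_by cs.length - i
decreasing_by
  · have := pvJB_gt m cs hm i h; omega
  · omega
  · omega

def fix_rank_group_py_alt (expr : String) : String :=
  let s := pvBuildB expr.toList 0 [] PySem.Dict.empty
  String.ofList (PySem.Chars.join []
    (pvLoopB expr.toList s.2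
      (pvBuild_keylt expr.toList 0 [] PySem.Dict.empty (by simp) (by intro a b h; simp [PySem.Dict.empty, PySem.Dict.get?] at h))
      0 0 []))

-- ===== PRECONDITION & SPEC =====
def Spec_fix_rank_group_py (expr : String) (out : String) : Prop := out = fix_rank_group_py_alt expr
instance (expr : String) (out : String) : Decidable (Spec_fix_rank_group_py expr out) := by unfold Spec_fix_rank_group_py; infer_instance

-- ===== CLAIM (what is proved, stated in full; the proofs are below) =====
def Claim_equal_fix_rank_group_py : Prop := ∀ (expr : String), Dom_fix_rank_group_py expr → Spec_fix_rank_group_py expr (fix_rank_group_py expr)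

-- ===== LEMMAS AND PROOFS =====

theorem pvJoin_nil (parts : List (List Char)) : PySem.Chars.join [] parts = parts.flatten := by
  simp only [PySem.Chars.join, List.intercalate]
  induction parts with
  | nil => simp
  | cons a t ih => cases t <;> simp_all [List.intersperse]

-- offset (within the scanned suffix) of the close paren where A's depth counter reaches 0
def pvMatchPos : List Char → Nat → Option Nat
  | [], _ => none
  | c :: t, d =>
    let d' := if c = '(' then d + 1 else if c = ')' then d - 1 else d
    if d' = 0 then some 0 else (pvMatchPos t d').map (· + 1)

theorem pvScanA_zero (l : List Char) : pvScanA l 0 = 0 := by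
  cases l <;> simp [pvScanA]

theorem pvScanA_le (l : List Char) (d : Int) : pvScanA l d ≤ l.length := by
  induction l generalizing d with
  | nil => simp [pvScanA]
  | cons c t ih =>
    simp only [pvScanA]
    split
    · have := ih (if c = '(' then d + 1 else if c = ')' then d - 1 else d)
      simp only [List.length_cons]; omega
    · simp

theorem pvScanA_eq (l : List Char) (d : Nat) (hd : 1 ≤ d) :
    pvScanA l (d : Int) = (pvMatchPos l d).elim l.length (· + 1) := by
  induction l generalizing d with
  | nil => simp [pvScanA, pvMatchPos]
  | cons c t ih =>
    have h0 : (0 : Int) < (d : Int) := by exact_mod_cast hd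
    simp only [pvScanA, pvMatchPos]
    rw [if_pos h0]
    by_cases hc1 : c = '('
    · have hcast : ((d : Int) + 1) = ((d + 1 : Nat) : Int) := by push_cast; ring
      simp only [if_pos hc1, hcast]
      rw [ih (d + 1) (by omega)]
      have : d + 1 ≠ 0 := by omega
      simp only [if_neg this]
      cases pvMatchPos t (d + 1) <;> simp [Option.elim] <;> omega
    · by_cases hc2 : c = ')'
      · simp only [if_neg hc1, if_pos hc2]
        by_cases hd1 : d = 1
        · subst hd1
          norm_num
          rw [pvScanA_zero]
        · have hcast : ((d : Int) - 1) = ((d - 1 : Nat) : Int) := by push_cast [hd]; ring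
          rw [hcast, ih (d - 1) (by omega)]
          have : d - 1 ≠ 0 := by omega
          simp only [if_neg this]
          cases pvMatchPos t (d - 1) <;> simp [Option.elim] <;> omega
      · simp only [if_neg hc1, if_neg hc2]
        rw [ih d hd]
        have : d ≠ 0 := by omega
        simp only [if_neg this]
        cases pvMatchPos t d <;> simp [Option.elim] <;> omega

theorem pvBuild_append (l1 l2 : List Char) (idx : Nat) (stk : List Nat) (m : PySem.Dict Nat Nat) :
    pvBuildB (l1 ++ l2) idx stk m =
      pvBuildB l2 (idx + l1.length) (pvBuildB l1 idx stk m).1 (pvBuildB l1 idx stk m).2 := by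
  induction l1 generalizing idx stk m with
  | nil => simp [pvBuildB]
  | cons c t ih =>
    simp only [List.cons_append, pvBuildB, List.length_cons]
    have harith : idx + (t.length + 1) = idx + 1 + t.length := by omega
    rw [harith]
    by_cases h1 : c = '('
    · simp only [if_pos h1]; exact ih _ _ _
    · by_cases h2 : c = ')'
      · simp only [if_neg h1, if_pos h2]
        rcases stk with _ | ⟨top, rest⟩
        · exact ih _ _ _
        · exact ih _ _ _
      · simp only [if_neg h1, if_neg h2]; exact ih _ _ _

theorem pvBuild_frame (l : List Char) : ∀ (idx : Nat) (stk : List Nat) (m : PySem.Dict Nat Nat)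
    (p : Nat), p ∉ stk → p < idx → ((pvBuildB l idx stk m).2).get? p = m.get? p := by
  induction l with
  | nil => intro idx stk m p _ _; rfl
  | cons c t ih =>
    intro idx stk m p hp hpi
    simp only [pvBuildB]
    by_cases h1 : c = '('
    · simp only [if_pos h1]
      refine ih _ _ _ _ (fun hmem => ?_) (by omega)
      rcases List.mem_cons.mp hmem with h | h
      · omega
      · exact hp h
    · by_cases h2 : c = ')'
      · simp only [if_neg h1, if_pos h2]
        rcases stk with _ | ⟨top, rest⟩
        · exact ih _ _ _ _ (by simp) (by omega)
        · rw [ih _ _ _ _ (fun hmem => hp (List.mem_cons_of_mem _ hmem)) (by omega)]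
          exact PySem.Dict.get?_insert_of_ne _ _ (fun hpt => hp (hpt ▸ List.mem_cons_self))
      · simp only [if_neg h1, if_neg h2]
        exact ih _ _ _ _ hp (by omega)

theorem pvBuild_spec (l : List Char) : ∀ (idx : Nat) (stk : List Nat) (m : PySem.Dict Nat Nat)
    (k p : Nat), stk.Nodup → (∀ q ∈ stk, q < idx) → stk[k]? = some p → m.get? p = none →
    ((pvBuildB l idx stk m).2).get? p = (pvMatchPos l (k + 1)).map (fun off => idx + off) := by
  induction l with
  | nil =>
    intro idx stk m k p _ _ _ hnone
    simpa [pvBuildB, pvMatchPos] using hnone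
  | cons c t ih =>
    intro idx stk m k p hnd hb hk hnone
    simp only [pvBuildB, pvMatchPos]
    by_cases h1 : c = '('
    · simp only [if_pos h1]
      have hne : k + 1 + 1 ≠ 0 := by omega
      rw [if_neg hne]
      rw [ih (idx + 1) (idx :: stk) m (k + 1) p
        (List.nodup_cons.mpr ⟨fun hmem => absurd (hb idx hmem) (lt_irrefl idx), hnd⟩)
        (by intro q hq; rcases List.mem_cons.mp hq with h | h
            · omega
            · have := hb q h; omega)
        (by simpa using hk) hnone]
      cases pvMatchPos t (k + 1 + 1) <;> simp <;> omega
    · by_cases h2 : c = ')'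
      · simp only [if_neg h1, if_pos h2]
        rcases stk with _ | ⟨top, rest⟩
        · simp at hk
        · rcases k with _ | k'
          · have hptop : top = p := by simpa using hk
            subst hptop
            rw [pvBuild_frame t (idx + 1) rest (m.insert top idx) top
              (List.nodup_cons.mp hnd).1 (by have := hb top List.mem_cons_self; omega)]
            rw [PySem.Dict.get?_insert_self]
            simp
          · have hk' : rest[k']? = some p := by simpa using hk
            have hptop : p ≠ top := by
              intro h
              exact (List.nodup_cons.mp hnd).1 (h ▸ List.mem_of_getElem? hk')
            rw [ih (idx + 1) rest (m.insert top idx) k' p (List.nodup_cons.mp hnd).2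
              (fun q hq => by have := hb q (List.mem_cons_of_mem _ hq); omega) hk'
              (by rw [PySem.Dict.get?_insert_of_ne _ _ hptop]; exact hnone)]
            have hne : k' + 1 + 1 - 1 ≠ 0 := by omega
            rw [if_neg hne]
            have harith : k' + 1 + 1 - 1 = k' + 1 := by omega
            rw [harith]
            cases pvMatchPos t (k' + 1) <;> simp <;> omega
      · simp only [if_neg h1, if_neg h2]
        have hne : k + 1 ≠ 0 := by omega
        rw [if_neg hne]
        rw [ih (idx + 1) stk m k p hnd (fun q hq => by have := hb q hq; omega) hk hnone]
        cases pvMatchPos t (k + 1) <;> simp <;> omega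

theorem pvBuild_inv (l : List Char) : ∀ (idx : Nat) (stk : List Nat) (m : PySem.Dict Nat Nat),
    stk.Nodup → (∀ q ∈ stk, q < idx) → (∀ q b, m.get? q = some b → q < idx) →
    (pvBuildB l idx stk m).1.Nodup ∧ (∀ q ∈ (pvBuildB l idx stk m).1, q < idx + l.length) ∧
      (∀ q b, ((pvBuildB l idx stk m).2).get? q = some b → q < idx + l.length) := by
  induction l with
  | nil =>
    intro idx stk m hnd hb hkeys
    refine ⟨hnd, fun q hq => ?_, fun q b h => ?_⟩
    · have := hb q hq; simp only [List.length_nil]; omega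
    · have := hkeys q b h; simp only [List.length_nil]; omega
  | cons c t ih =>
    intro idx stk m hnd hb hkeys
    simp only [pvBuildB, List.length_cons]
    by_cases h1 : c = '('
    · simp only [if_pos h1]
      obtain ⟨ha, hb2, hc2⟩ := ih (idx + 1) (idx :: stk) m
        (List.nodup_cons.mpr ⟨fun hmem => absurd (hb idx hmem) (lt_irrefl idx), hnd⟩)
        (by intro q hq; rcases List.mem_cons.mp hq with h | h
            · omega
            · have := hb q h; omega)
        (fun q b h => by have := hkeys q b h; omega)
      exact ⟨ha, fun q hq => by have := hb2 q hq; omega,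
        fun q b h => by have := hc2 q b h; omega⟩
    · by_cases h2 : c = ')'
      · simp only [if_neg h1, if_pos h2]
        rcases stk with _ | ⟨top, rest⟩
        · obtain ⟨ha, hb2, hc2⟩ := ih (idx + 1) [] m (by simp) (by simp)
            (fun q b h => by have := hkeys q b h; omega)
          exact ⟨ha, fun q hq => by have := hb2 q hq; omega,
            fun q b h => by have := hc2 q b h; omega⟩
        · obtain ⟨ha, hb2, hc2⟩ := ih (idx + 1) rest (m.insert top idx) (List.nodup_cons.mp hnd).2
            (fun q hq => by have := hb q (List.mem_cons_of_mem _ hq); omega)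
            (fun q b h => by
              by_cases hq : q = top
              · have := hb top List.mem_cons_self; omega
              · rw [PySem.Dict.get?_insert_of_ne _ _ hq] at h
                have := hkeys q b h; omega)
          exact ⟨ha, fun q hq => by have := hb2 q hq; omega,
            fun q b h => by have := hc2 q b h; omega⟩
      · simp only [if_neg h1, if_neg h2]
        obtain ⟨ha, hb2, hc2⟩ := ih (idx + 1) stk m hnd (fun q hq => by have := hb q hq; omega)
          (fun q b h => by have := hkeys q b h; omega)
        exact ⟨ha, fun q hq => by have := hb2 q hq; omega,
          fun q b h => by have := hc2 q b h; omega⟩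

theorem pvDict_spec (cs : List Char) (p : Nat) (hp : p < cs.length) (hc : cs[p] = '(') :
    ((pvBuildB cs 0 [] PySem.Dict.empty).2).get? p =
      (pvMatchPos (cs.drop (p + 1)) 1).map (fun off => (p + 1) + off) := by
  have hdrop : cs.drop p = cs[p] :: cs.drop (p + 1) := List.drop_eq_getElem_cons hp
  have hsplit : cs.take p ++ cs[p] :: cs.drop (p + 1) = cs := by
    rw [← hdrop, List.take_append_drop]
  obtain ⟨hnd, hbound, hkeys⟩ := pvBuild_inv (cs.take p) 0 [] PySem.Dict.empty
    (by simp) (by simp) (by intro q b h; simp [PySem.Dict.empty, PySem.Dict.get?] at h)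
  have hlen : (cs.take p).length = p := List.length_take_of_le (by omega)
  rw [hlen] at hbound hkeys
  conv_lhs => rw [← hsplit]
  rw [pvBuild_append]
  simp only [pvBuildB, hc, if_pos, hlen, Nat.zero_add]
  have hnone : ((pvBuildB (cs.take p) 0 [] PySem.Dict.empty).2).get? p = none := by
    cases h : ((pvBuildB (cs.take p) 0 [] PySem.Dict.empty).2).get? p with
    | none => rfl
    | some b => have := hkeys p b h; omega
  exact pvBuild_spec (cs.drop (p + 1)) (p + 1) (p :: (pvBuildB (cs.take p) 0 [] PySem.Dict.empty).1)
    (pvBuildB (cs.take p) 0 [] PySem.Dict.empty).2 0 p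
    (List.nodup_cons.mpr ⟨fun hmem => by have := hbound p hmem; omega, hnd⟩)
    (by intro q hq; rcases List.mem_cons.mp hq with h | h
        · omega
        · have := hbound q h; omega)
    (by simp) hnone

theorem pvJ_eq (cs : List Char) (i : Nat) (h5 : i + 5 ≤ cs.length)
    (hc : cs[i + 4]'(by omega) = '(') :
    pvJB (pvBuildB cs 0 [] PySem.Dict.empty).2 cs i = pvJA cs i := by
  unfold pvJB pvJA
  have h45 : i + 4 + 1 = i + 5 := by omega
  have hsc := pvScanA_eq (cs.drop (i + 5)) 1 le_rfl
  norm_num at hsc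
  rw [pvDict_spec cs (i + 4) (by omega) hc, h45, hsc]
  cases h : pvMatchPos (cs.drop (i + 5)) 1 with
  | none =>
    simp only [Option.map_none, Option.elim]
    have : (cs.drop (i + 5)).length = cs.length - (i + 5) := List.length_drop
    omega
  | some off =>
    simp only [Option.map_some, Option.elim]
    ring

theorem pvCond_eq (cs : List Char) (i : Nat) : pvCondA cs i = pvCondB cs i := by
  unfold pvCondA pvCondB PySem.Chars.startswith
  have h1 : (PySem.List.slice cs (some (i : Int)) (some ((i + 5 : Nat) : Int)) == pvRank) =
      pvRank.isPrefixOf (cs.drop i) := by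
    rw [PySem.List.slice_natCast, Nat.add_sub_cancel_left, Bool.eq_iff_iff]
    simp only [beq_iff_eq, List.isPrefixOf_iff_prefix, List.prefix_iff_eq_take]
    have : pvRank.length = 5 := rfl
    rw [this]
    exact eq_comm
  rw [h1, Bool.not_or]
  rfl

theorem pvGrp_eq (inner : List Char) : pvGrpA pvGroups inner = pvGrpB inner := by
  simp only [pvGrpA, pvGrpB, pvGroups, List.any]
  split_ifs <;> simp_all

theorem pvCondA_rank {cs : List Char} {i : Nat} (h : pvCondA cs i = true) :
    (cs.drop i).take 5 = pvRank := by
  unfold pvCondA at h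
  have h1 := (Bool.and_eq_true_iff.mp h).1
  rw [PySem.List.slice_natCast, Nat.add_sub_cancel_left] at h1
  exact beq_iff_eq.mp h1

theorem pvCondA_facts {cs : List Char} {i : Nat} (h : pvCondA cs i = true) :
    i + 5 ≤ cs.length ∧ cs[i + 4]? = some '(' := by
  have hr := pvCondA_rank h
  have hlen : ((cs.drop i).take 5).length = 5 := by rw [hr]; rfl
  simp only [List.length_take, List.length_drop] at hlen
  refine ⟨by omega, ?_⟩
  have h4 : cs[i + 4]? = (cs.drop i)[4]? := List.getElem?_drop.symm
  have h5 : (cs.drop i)[4]? = ((cs.drop i).take 5)[4]? := by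
    rw [List.getElem?_take_of_lt (by omega)]
  rw [h4, h5, hr]
  rfl

theorem pvLoopA_append (cs : List Char) :
    ∀ (k i : Nat) (acc : List (List Char)), cs.length - i ≤ k →
      pvLoopA cs i acc = acc ++ pvLoopA cs i [] := by
  intro k
  induction k with
  | zero =>
    intro i acc hk
    conv_lhs => rw [pvLoopA]
    conv_rhs => rw [pvLoopA]
    rw [dif_neg (by omega), dif_neg (by omega)]
    simp
  | succ k ih =>
    intro i acc hk
    by_cases hi : i < cs.length
    · conv_lhs => rw [pvLoopA]
      conv_rhs => rw [pvLoopA]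
      rw [dif_pos hi, dif_pos hi]
      by_cases hcond : pvCondA cs i = true
      · rw [if_pos hcond, if_pos hcond]
        by_cases hgrp : pvGrpA pvGroups (pvInnerA cs i) = true
        · rw [if_pos hgrp, if_pos hgrp]
          have hj := pvJA_ge cs i
          rw [ih (pvJA cs i) _ (by omega), ih (pvJA cs i) ([] ++ [pvGroupRank (pvInnerA cs i)]) (by omega)]
          simp
        · rw [if_neg hgrp, if_neg hgrp]
          rw [ih (i + 1) _ (by omega), ih (i + 1) ([] ++ [[cs[i]]]) (by omega)]
          simp
      · rw [if_neg hcond, if_neg hcond]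
        rw [ih (i + 1) _ (by omega), ih (i + 1) ([] ++ [[cs[i]]]) (by omega)]
        simp
    · conv_lhs => rw [pvLoopA]
      conv_rhs => rw [pvLoopA]
      rw [dif_neg hi, dif_neg hi]
      simp

theorem pvJA_le (cs : List Char) (i : Nat) (h5 : i + 5 ≤ cs.length) :
    pvJA cs i ≤ cs.length := by
  have := pvScanA_le (cs.drop (i + 5)) 1
  simp only [List.length_drop] at this
  simp only [pvJA]
  omega

theorem pvLoopA_step_grp {cs : List Char} {i : Nat} (hi : i < cs.length)
    (hcond : pvCondA cs i = true) (hgrp : pvGrpA pvGroups (pvInnerA cs i) = true) :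
    pvLoopA cs i [] = pvGroupRank (pvInnerA cs i) :: pvLoopA cs (pvJA cs i) [] := by
  conv_lhs => rw [pvLoopA]
  rw [dif_pos hi, if_pos hcond, if_pos hgrp]
  rw [pvLoopA_append cs cs.length (pvJA cs i) _ (by omega)]
  simp

theorem pvLoopA_step_one {cs : List Char} {i : Nat} (hi : i < cs.length)
    (h : pvCondA cs i = false ∨ pvGrpA pvGroups (pvInnerA cs i) = false) :
    pvLoopA cs i [] = [cs[i]] :: pvLoopA cs (i + 1) [] := by
  conv_lhs => rw [pvLoopA]
  rw [dif_pos hi]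
  rcases h with h | h
  · rw [if_neg (by simp [h]), pvLoopA_append cs cs.length (i + 1) _ (by omega)]
    simp
  · by_cases hcond : pvCondA cs i = true
    · rw [if_pos hcond, if_neg (by simp [h]), pvLoopA_append cs cs.length (i + 1) _ (by omega)]
      simp
    · rw [if_neg hcond, pvLoopA_append cs cs.length (i + 1) _ (by omega)]
      simp

theorem pvMain_base (cs : List Char)
    (hm : ∀ a b, ((pvBuildB cs 0 [] PySem.Dict.empty).2).get? a = some b → a < b)
    (last : Nat) (out : List (List Char)) :
    (pvLoopB cs (pvBuildB cs 0 [] PySem.Dict.empty).2 hm cs.length last out).flatten =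
      out.flatten ++ (cs.drop last).take (cs.length - last) ++
        (pvLoopA cs cs.length []).flatten := by
  conv_lhs => rw [pvLoopB]
  rw [dif_neg (lt_irrefl _)]
  conv_rhs => rw [pvLoopA]
  rw [dif_neg (lt_irrefl _)]
  have htake : (cs.drop last).take (cs.length - last) = cs.drop last :=
    List.take_of_length_le (by simp)
  simp [htake]

theorem pvTakeExt {cs : List Char} {i last : Nat} (hl : last ≤ i) (hi : i < cs.length) :
    (cs.drop last).take (i + 1 - last) = (cs.drop last).take (i - last) ++ [cs[i]] := by
  have h1 : i + 1 - last = (i - last) + 1 := by omega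
  rw [h1, List.take_add_one]
  congr 1
  have h2 : (cs.drop last)[i - last]? = cs[last + (i - last)]? := List.getElem?_drop
  have h3 : last + (i - last) = i := by omega
  rw [h2, h3, List.getElem?_eq_getElem hi]
  rfl

theorem pvMain (cs : List Char)
    (hm : ∀ a b, ((pvBuildB cs 0 [] PySem.Dict.empty).2).get? a = some b → a < b) :
    ∀ (k i last : Nat) (out : List (List Char)), cs.length - i ≤ k → last ≤ i →
      i ≤ cs.length →
      (pvLoopB cs (pvBuildB cs 0 [] PySem.Dict.empty).2 hm i last out).flatten =
        out.flatten ++ (cs.drop last).take (i - last) ++ (pvLoopA cs i []).flatten := by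
  intro k
  induction k with
  | zero =>
    intro i last out hk hl hn
    have hieq : i = cs.length := by omega
    subst hieq
    exact pvMain_base cs hm last out
  | succ k ih =>
    intro i last out hk hl hn
    by_cases hi : i < cs.length
    · by_cases hcond : pvCondB cs i = true
      · have hcondA : pvCondA cs i = true := (pvCond_eq cs i).trans hcond
        obtain ⟨h5, hc?⟩ := pvCondA_facts hcondA
        obtain ⟨hlt4, hc⟩ := List.getElem?_eq_some_iff.mp hc?
        have hj : pvJB (pvBuildB cs 0 [] PySem.Dict.empty).2 cs i = pvJA cs i :=
          pvJ_eq cs i h5 hc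
        have hinner : pvInnerB (pvBuildB cs 0 [] PySem.Dict.empty).2 cs i = pvInnerA cs i := by
          unfold pvInnerB pvInnerA
          rw [hj]
        conv_lhs => rw [pvLoopB]
        rw [dif_pos hi, if_pos hcond, hinner, hj]
        cases hgrp : pvGrpA pvGroups (pvInnerA cs i) with
        | true =>
          have hgrpB : pvGrpB (pvInnerA cs i) = true := by rw [← pvGrp_eq]; exact hgrp
          rw [if_pos hgrpB]
          have hjle : pvJA cs i ≤ cs.length := pvJA_le cs i h5
          have hjge := pvJA_ge cs i
          rw [ih (pvJA cs i) (pvJA cs i) _ (by omega) (le_refl _) hjle]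
          rw [pvLoopA_step_grp hi hcondA hgrp]
          have hchunk : PySem.List.slice cs (some (last : Int)) (some (i : Int)) =
              (cs.drop last).take (i - last) := by
            rw [PySem.List.slice_natCast]
          rw [hchunk]
          simp
        | false =>
          have hgrpB : pvGrpB (pvInnerA cs i) = false := by rw [← pvGrp_eq]; exact hgrp
          rw [if_neg (by simp [hgrpB])]
          rw [ih (i + 1) last out (by omega) (by omega) (by omega)]
          rw [pvLoopA_step_one hi (Or.inr hgrp)]
          rw [pvTakeExt hl hi]
          simp
      · have hcondA : pvCondA cs i = false := by
          rw [pvCond_eq]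
          simpa using hcond
        conv_lhs => rw [pvLoopB]
        rw [dif_pos hi, if_neg (by simp [(pvCond_eq cs i) ▸ hcondA])]
        rw [ih (i + 1) last out (by omega) (by omega) (by omega)]
        rw [pvLoopA_step_one hi (Or.inl hcondA)]
        rw [pvTakeExt hl hi]
        simp
    · have hieq : i = cs.length := by omega
      subst hieq
      exact pvMain_base cs hm last out

-- ===== VERDICT (by name: the statement is the Claim_ definition above) =====
theorem fix_rank_group_py_spec : Claim_equal_fix_rank_group_py := by
  intro expr _
  unfold Spec_fix_rank_group_py fix_rank_group_py fix_rank_group_py_alt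
  simp only [pvJoin_nil]
  have h := pvMain expr.toList
    (pvBuild_keylt expr.toList 0 [] PySem.Dict.empty (by simp)
      (by intro a b h; simp [PySem.Dict.empty, PySem.Dict.get?] at h))
    expr.toList.length 0 0 [] (by omega) (by omega) (by omega)
  rw [h]
  simp
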